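-- pv_equiv track=rewrite | github.com/AVINASH0052/legal_intelligence_agent | rag_agent/agent.py | plan_steps
-- ===== SOURCE A (Python) =====
-- from typing import List, Dict, Any, Tuple
--
-- def plan_steps(issues: List[str]) -> List[str]:
--     steps = ["Confirm enabling law (legality) and legitimate aim."]
--     if "proportionality" in issues or "privacy" in issues or "biometric" in issues or "surveillance" in issues:
--         steps += [
--             "Assess suitability to the aim.",
--             "Assess necessity (less intrusive means).",
--             "Assess balancing and safeguards (purpose, storage, oversight).",
--         ]
--     if "religion" in issues:
--         steps.append("Consider Article 25 scope and any 25(2) justifications.")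
--     if "expression" in issues:
--         steps.append("If Article 19(1)(a) is implicated, analyze reasonableness and proportionality.")
--     if "trade" in issues:
--         steps.append("If Article 19(1)(g) is implicated, test reasonableness of restrictions.")
--     if "equality" in issues:
--         steps.append("Check Article 14 arbitrariness and equal protection concerns.")
--     steps.append("Draft positions and propose outcome.")
--     # de-duplicate while preserving order
--     seen = set()
--     uniq = []
--     for s in steps:
--         if s not in seen:
--             uniq.append(s); seen.add(s)
--     return uniq
-- ===== SOURCE B (Python) =====
-- from typing import List, Dict, Any, Tuple
--
-- # Canonical pool of every possible step, in output order.
-- _POOL = [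
--     "Confirm enabling law (legality) and legitimate aim.",
--     "Assess suitability to the aim.",
--     "Assess necessity (less intrusive means).",
--     "Assess balancing and safeguards (purpose, storage, oversight).",
--     "Consider Article 25 scope and any 25(2) justifications.",
--     "If Article 19(1)(a) is implicated, analyze reasonableness and proportionality.",
--     "If Article 19(1)(g) is implicated, test reasonableness of restrictions.",
--     "Check Article 14 arbitrariness and equal protection concerns.",
--     "Draft positions and propose outcome.",
-- ]
--
-- # Inverted index: issue flag -> indices of the pool steps it switches on.
-- _TRIGGERS = {
--     "proportionality": {1, 2, 3},
--     "privacy": {1, 2, 3},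
--     "biometric": {1, 2, 3},
--     "surveillance": {1, 2, 3},
--     "religion": {4},
--     "expression": {5},
--     "trade": {6},
--     "equality": {7},
-- }
--
-- def plan_steps(issues: List[str]) -> List[str]:
--     wanted = {0, 8}  # legality step and final step are unconditional
--     for it in issues:
--         wanted |= _TRIGGERS.get(it, set())
--     return [s for i, s in enumerate(_POOL) if i in wanted]
-- ===== Notes on version B (the rewrite author's own statement) =====
-- stated objective: alternative
-- what changed: Inverted the control flow: instead of an if-chain that appends hard-coded step blocks and then de-duplicates with a seen-set, B folds over the ISSUES through an inverted index (flag -> step indices), accumulating a set of wanted indices, and emits the result by filtering one canonical pool of all nine steps; the dedup pass disappears because the pool is duplicate-free by construction.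
import Mathlib
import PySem

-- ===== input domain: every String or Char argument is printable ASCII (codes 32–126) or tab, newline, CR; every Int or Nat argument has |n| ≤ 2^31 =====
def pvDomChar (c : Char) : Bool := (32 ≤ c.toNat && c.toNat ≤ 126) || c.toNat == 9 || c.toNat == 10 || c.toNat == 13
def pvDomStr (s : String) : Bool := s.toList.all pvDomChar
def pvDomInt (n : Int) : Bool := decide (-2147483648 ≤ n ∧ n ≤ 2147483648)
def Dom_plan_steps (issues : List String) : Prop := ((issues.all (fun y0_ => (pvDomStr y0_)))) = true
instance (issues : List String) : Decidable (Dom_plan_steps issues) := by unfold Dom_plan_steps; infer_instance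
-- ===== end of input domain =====

-- B inverts the control flow: instead of an if-chain appending step blocks (plus a set-based
-- dedup), it folds over the ISSUES through an inverted index (flag -> step indices) collecting
-- a wanted-index set, then filters one canonical pool of all steps (idiomatic/alternative).

-- ===== PORT A =====
def plan_steps (issues : List String) : List String :=
  let steps := ["Confirm enabling law (legality) and legitimate aim."]
  let steps := if "proportionality" ∈ issues ∨ "privacy" ∈ issues ∨ "biometric" ∈ issues ∨ "surveillance" ∈ issues then
      steps ++ ["Assess suitability to the aim.",
                "Assess necessity (less intrusive means).",
                "Assess balancing and safeguards (purpose, storage, oversight)."]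
    else steps
  let steps := if "religion" ∈ issues then steps ++ ["Consider Article 25 scope and any 25(2) justifications."] else steps
  let steps := if "expression" ∈ issues then steps ++ ["If Article 19(1)(a) is implicated, analyze reasonableness and proportionality."] else steps
  let steps := if "trade" ∈ issues then steps ++ ["If Article 19(1)(g) is implicated, test reasonableness of restrictions."] else steps
  let steps := if "equality" ∈ issues then steps ++ ["Check Article 14 arbitrariness and equal protection concerns."] else steps
  let steps := steps ++ ["Draft positions and propose outcome."]
  -- de-duplicate while preserving order (seen is a Python set)
  (steps.foldl
    (fun (acc : PySem.Set String × List String) s =>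
      if PySem.Set.contains acc.1 s then acc else (PySem.Set.add acc.1 s, acc.2 ++ [s]))
    (PySem.Set.empty, [])).2

-- ===== PORT B =====
def pvPool : List String :=
  [ "Confirm enabling law (legality) and legitimate aim.",
    "Assess suitability to the aim.",
    "Assess necessity (less intrusive means).",
    "Assess balancing and safeguards (purpose, storage, oversight).",
    "Consider Article 25 scope and any 25(2) justifications.",
    "If Article 19(1)(a) is implicated, analyze reasonableness and proportionality.",
    "If Article 19(1)(g) is implicated, test reasonableness of restrictions.",
    "Check Article 14 arbitrariness and equal protection concerns.",
    "Draft positions and propose outcome." ]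

def pvTriggers : PySem.Dict String (PySem.Set Int) :=
  PySem.Dict.ofList
    [ ("proportionality", PySem.Set.ofList [1, 2, 3]),
      ("privacy", PySem.Set.ofList [1, 2, 3]),
      ("biometric", PySem.Set.ofList [1, 2, 3]),
      ("surveillance", PySem.Set.ofList [1, 2, 3]),
      ("religion", PySem.Set.ofList [4]),
      ("expression", PySem.Set.ofList [5]),
      ("trade", PySem.Set.ofList [6]),
      ("equality", PySem.Set.ofList [7]) ]

-- the 'for it in issues: wanted |= _TRIGGERS.get(it, set())' loop
def pvWanted (issues : List String) : PySem.Set Int :=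
  issues.foldl
    (fun w it => PySem.Set.union w (PySem.Dict.getD pvTriggers it PySem.Set.empty))
    (PySem.Set.ofList [0, 8])

def plan_steps_alt (issues : List String) : List String :=
  ((PySem.List.enumerate pvPool).filter
    (fun p => PySem.Set.contains (pvWanted issues) p.1)).map (·.2)

-- ===== PRECONDITION & SPEC =====
def Spec_plan_steps (issues : List String) (out : List String) : Prop := out = plan_steps_alt issues
instance (issues : List String) (out : List String) : Decidable (Spec_plan_steps issues out) := by unfold Spec_plan_steps; infer_instance

-- ===== CLAIM =====
def Claim_equal_plan_steps : Prop := ∀ (issues : List String), Dom_plan_steps issues → Spec_plan_steps issues (plan_steps issues)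

-- ===== LEMMAS AND PROOFS =====

theorem pv_mem_wanted (issues : List String) (w : PySem.Set Int) (i : Int) :
    i ∈ issues.foldl
      (fun w it => PySem.Set.union w (PySem.Dict.getD pvTriggers it PySem.Set.empty)) w ↔
    i ∈ w ∨ ∃ it ∈ issues, i ∈ PySem.Dict.getD pvTriggers it PySem.Set.empty := by
  induction issues generalizing w with
  | nil => simp
  | cons x xs ih =>
    simp only [List.foldl_cons, ih, PySem.Set.mem_union, List.mem_cons]
    constructor
    · rintro (⟨h | h⟩ | ⟨it, hit, h⟩)
      · exact Or.inl h
      · exact Or.inr ⟨x, Or.inl rfl, h⟩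
      · exact Or.inr ⟨it, Or.inr hit, h⟩
    · rintro (h | ⟨it, (rfl | hit), h⟩)
      · exact Or.inl (Or.inl h)
      · exact Or.inl (Or.inr h)
      · exact Or.inr ⟨it, hit, h⟩

theorem pv_getD_triggers (it : String) :
    PySem.Dict.getD pvTriggers it PySem.Set.empty =
      if it = "proportionality" ∨ it = "privacy" ∨ it = "biometric" ∨ it = "surveillance" then [1, 2, 3]
      else if it = "religion" then [4]
      else if it = "expression" then [5]
      else if it = "trade" then [6]
      else if it = "equality" then [7]
      else [] := by
  by_cases h1 : it = "proportionality"
  · subst h1; rfl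
  by_cases h2 : it = "privacy"
  · subst h2; rfl
  by_cases h3 : it = "biometric"
  · subst h3; rfl
  by_cases h4 : it = "surveillance"
  · subst h4; rfl
  by_cases h5 : it = "religion"
  · subst h5; rfl
  by_cases h6 : it = "expression"
  · subst h6; rfl
  by_cases h7 : it = "trade"
  · subst h7; rfl
  by_cases h8 : it = "equality"
  · subst h8; rfl
  have hT : pvTriggers = PySem.Dict.mk
      [ ("proportionality", PySem.Set.ofList [1, 2, 3]),
        ("privacy", PySem.Set.ofList [1, 2, 3]),
        ("biometric", PySem.Set.ofList [1, 2, 3]),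
        ("surveillance", PySem.Set.ofList [1, 2, 3]),
        ("religion", PySem.Set.ofList [4]),
        ("expression", PySem.Set.ofList [5]),
        ("trade", PySem.Set.ofList [6]),
        ("equality", PySem.Set.ofList [7]) ] := by rfl
  simp only [h1, h2, h3, h4, h5, h6, h7, h8, or_self, if_false]
  rw [hT]
  simp [PySem.Dict.getD, beq_iff_eq,
    Ne.symm h1, Ne.symm h2, Ne.symm h3, Ne.symm h4, Ne.symm h5,
    Ne.symm h6, Ne.symm h7, Ne.symm h8, PySem.Dict.get?]

theorem pv_contains_wanted (issues : List String) (i : Int) :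
    i ∈ pvWanted issues ↔
      i = 0 ∨ i = 8 ∨ ∃ it ∈ issues, i ∈ PySem.Dict.getD pvTriggers it PySem.Set.empty := by
  unfold pvWanted
  rw [pv_mem_wanted]
  simp [PySem.Set.mem_ofList]
  tauto

theorem pv_cw0 (issues : List String) : (0 : Int) ∈ pvWanted issues := by
  rw [pv_contains_wanted]; exact Or.inl rfl

theorem pv_cw8 (issues : List String) : (8 : Int) ∈ pvWanted issues := by
  rw [pv_contains_wanted]; exact Or.inr (Or.inl rfl)

theorem pv_cw_group (issues : List String) (i : Int) (hi : i = 1 ∨ i = 2 ∨ i = 3) :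
    (i ∈ pvWanted issues) ↔
      ("proportionality" ∈ issues ∨ "privacy" ∈ issues ∨ "biometric" ∈ issues ∨ "surveillance" ∈ issues) := by
  rw [pv_contains_wanted]
  constructor
  · rintro (h | h | ⟨it, hit, hm⟩)
    · omega
    · omega
    · rw [pv_getD_triggers] at hm
      split_ifs at hm with g1 g2 g3 g4 g5 <;> first
        | (rcases g1 with h | h | h | h <;> simp_all)
        | (exfalso; rcases hi with rfl | rfl | rfl <;> simp_all)
  · intro h
    refine Or.inr (Or.inr ?_)
    rcases h with h | h | h | h <;>
      exact ⟨_, h, by rw [pv_getD_triggers]; simp; omega⟩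

theorem pv_cw_single (issues : List String) (i : Int) (k : String)
    (hk : (i = 4 ∧ k = "religion") ∨ (i = 5 ∧ k = "expression") ∨ (i = 6 ∧ k = "trade") ∨ (i = 7 ∧ k = "equality")) :
    (i ∈ pvWanted issues) ↔ k ∈ issues := by
  rw [pv_contains_wanted]
  constructor
  · rintro (h | h | ⟨it, hit, hm⟩)
    · omega
    · omega
    · rw [pv_getD_triggers] at hm
      split_ifs at hm with g1 g2 g3 g4 g5 <;> rcases hk with ⟨rfl, rfl⟩ | ⟨rfl, rfl⟩ | ⟨rfl, rfl⟩ | ⟨rfl, rfl⟩ <;> simp_all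
  · intro h
    refine Or.inr (Or.inr ?_)
    rcases hk with ⟨rfl, rfl⟩ | ⟨rfl, rfl⟩ | ⟨rfl, rfl⟩ | ⟨rfl, rfl⟩ <;>
      exact ⟨_, h, by rw [pv_getD_triggers]; simp⟩

-- ===== VERDICT =====
theorem plan_steps_spec : Claim_equal_plan_steps := by
  intro issues _
  unfold Spec_plan_steps plan_steps plan_steps_alt pvPool
  have c1 := pv_cw_group issues 1 (by omega)
  have c2 := pv_cw_group issues 2 (by omega)
  have c3 := pv_cw_group issues 3 (by omega)
  have c4 := pv_cw_single issues 4 "religion" (by simp)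
  have c5 := pv_cw_single issues 5 "expression" (by simp)
  have c6 := pv_cw_single issues 6 "trade" (by simp)
  have c7 := pv_cw_single issues 7 "equality" (by simp)
  by_cases hg : "proportionality" ∈ issues ∨ "privacy" ∈ issues ∨ "biometric" ∈ issues ∨ "surveillance" ∈ issues <;>
  by_cases hr : "religion" ∈ issues <;>
  by_cases he : "expression" ∈ issues <;>
  by_cases ht : "trade" ∈ issues <;>
  by_cases hq : "equality" ∈ issues <;>
  simp [PySem.List.enumerate_cons, PySem.List.enumerate_nil, List.filter_nil,
    pv_cw0, pv_cw8, c1, c2, c3, c4, c5, c6, c7, hg, hr, he, ht, hq]
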